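-- pv_equiv track=rewrite | github.com/rkham93/python | GAMES/HangMan/hangman.py | chancesCalculator
-- ===== SOURCE A (Python) =====
-- def chancesCalculator(word):
--     Dict={}
--     room_for_error=5
--     chances=len(word)+room_for_error
--
--     for letter in word:
--         letterCount=word.count(letter)
--         if letterCount>1:
--             Dict[letter]=letterCount
--
--     chances-=sum(list(Dict.values()))
--     return chances
-- ===== SOURCE B (Python) =====
-- def chancesCalculator(word):
--     # sort the letters, scan maximal runs of equal letters, count runs of length 1
--     s = sorted(word)
--     singles = 0
--     i, n = 0, len(s)
--     while i < n:
--         j = i + 1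
--         while j < n and s[j] == s[i]:
--             j += 1
--         if j == i + 1:
--             singles += 1
--         i = j
--     return singles + 5
-- ===== Notes on version B (the rewrite author's own statement) =====
-- stated objective: faster
-- what changed: A scans word with an O(n) word.count for every letter and accumulates repeat counts in a dict; B sorts the letters once and makes a single run-scan over the sorted sequence counting runs of length 1, returning that count plus 5.
import Mathlib
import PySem

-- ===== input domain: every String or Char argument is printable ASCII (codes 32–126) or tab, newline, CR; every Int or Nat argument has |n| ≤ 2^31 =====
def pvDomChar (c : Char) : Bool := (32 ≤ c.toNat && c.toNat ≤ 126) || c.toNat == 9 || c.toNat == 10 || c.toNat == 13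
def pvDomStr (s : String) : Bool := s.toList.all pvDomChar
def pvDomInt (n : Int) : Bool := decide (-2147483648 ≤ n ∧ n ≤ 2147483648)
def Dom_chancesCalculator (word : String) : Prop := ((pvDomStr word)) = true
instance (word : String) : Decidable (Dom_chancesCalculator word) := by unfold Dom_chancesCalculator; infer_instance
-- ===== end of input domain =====

-- B replaces A's per-letter word.count scans and repeat-count dict (O(n^2)) by a sort plus
-- one run-scan counting singleton runs (O(n log n)); equivalence is exact, both total.


-- ===== PORT A =====
-- word.count(letter) is str.count with a one-character needle, which is exactly the
-- character count List.count (exact on every input).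
def chancesCalculator (word : String) : Int :=
  let w := word.toList
  let d : PySem.Dict Char Int :=
    w.foldl (fun d letter =>
      let letterCount : Int := (w.count letter : Int)
      if 1 < letterCount then d.insert letter letterCount else d)
      PySem.Dict.empty
  let chances : Int := (w.length : Int) + 5
  chances - d.values.sum

-- ===== PORT B =====
-- the outer while loop of Source B: each step consumes one maximal run s[i..j) of equal
-- letters (the inner while = takeWhile/dropWhile) and adds 1 when the run has length 1
def pvRuns1 : List Char → Int
  | [] => 0
  | c :: rest =>
      (if (rest.takeWhile (fun x => x == c)).isEmpty then 1 else 0) +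
        pvRuns1 (rest.dropWhile (fun x => x == c))
termination_by l => l.length
decreasing_by
  have := List.length_dropWhile_le (fun x => x == c) rest
  simp only [List.length_cons]
  omega

def chancesCalculator_alt (word : String) : Int :=
  pvRuns1 (PySem.List.sorted word.toList (fun x => x) false) + 5

-- ===== PRECONDITION & SPEC =====
def Spec_chancesCalculator (word : String) (out : Int) : Prop := out = chancesCalculator_alt word
instance (word : String) (out : Int) : Decidable (Spec_chancesCalculator word out) := by unfold Spec_chancesCalculator; infer_instance

-- ===== CLAIM (what is proved, stated in full; the proofs are below) =====
def Claim_equal_chancesCalculator : Prop := ∀ (word : String), Dom_chancesCalculator word → Spec_chancesCalculator word (chancesCalculator word)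

-- ===== LEMMAS AND PROOFS =====

-- a fold of inserts whose value depends only on the key: lookup is "last write wins", same value
theorem pv_getD_foldl_insert_fun (l : List Char) (f : Char → Int) (d : PySem.Dict Char Int) (k : Char) :
    (l.foldl (fun d c => d.insert c (f c)) d).getD k 0
      = if k ∈ l then f k else d.getD k 0 := by
  induction l generalizing d with
  | nil => simp
  | cons c t ih =>
      rw [List.foldl_cons, ih]
      by_cases hk : k ∈ t
      · simp [hk]
      · by_cases hc : k = c <;> simp [hk, hc, PySem.Dict.getD_insert]

-- splitting a list's length by a predicate
theorem pv_length_filter_split (l : List Char) (p : Char → Bool) :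
    (l.filter p).length + (l.filter (fun x => !p x)).length = l.length := by
  induction l with
  | nil => rfl
  | cons a t ih => cases ha : p a <;> simp [ha] <;> omega

-- the first element surviving dropWhile fails the predicate
theorem pv_not_head_dropWhile (p : Char → Bool) (l : List Char) (e : Char) (t : List Char)
    (h : l.dropWhile p = e :: t) : p e = false := by
  induction l with
  | nil => simp at h
  | cons a l ih =>
      rw [List.dropWhile_cons] at h
      by_cases ha : p a
      · rw [if_pos ha] at h; exact ih h
      · rw [if_neg ha] at h
        cases h
        simpa using ha

-- sum of the multiplicities over a duplicate-free index of F = length of F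
theorem pv_sum_counts (F : List Char) (K : List Char) (hnd : K.Nodup)
    (hmem : ∀ x, x ∈ K ↔ x ∈ F) :
    (K.map (fun k => F.count k)).sum = F.length := by
  have hperm : K.Perm F.dedup := by
    rw [List.perm_ext_iff_of_nodup hnd F.nodup_dedup]
    intro a; rw [hmem, List.mem_dedup]
  calc (K.map (fun k => F.count k)).sum
      = (F.dedup.map (fun k => F.count k)).sum := (hperm.map _).sum_eq
    _ = F.length := List.sum_map_count_dedup_eq_length F

-- A's value in closed form: 5 + number of letters occurring exactly once
theorem pvA_closed (word : String) :
    chancesCalculator word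
      = 5 + ((word.toList.filter (fun c => word.toList.count c == 1)).length : Int) := by
  have hstep : chancesCalculator word
      = ((word.toList.length : Nat) : Int) + 5
        - (word.toList.foldl (fun (d : PySem.Dict Char Int) letter =>
            if 1 < ((word.toList.count letter : Nat) : Int)
            then d.insert letter ((word.toList.count letter : Nat) : Int) else d)
          PySem.Dict.empty).values.sum := rfl
  rw [hstep]
  set w : List Char := word.toList with hw
  set p : Char → Bool := fun x => decide (1 < ((w.count x : Nat) : Int)) with hp
  set F : List Char := w.filter p with hF
  -- the dict-building loop only acts on the letters passing the repeat test
  have hfold : (w.foldl (fun (d : PySem.Dict Char Int) letter =>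
        if 1 < ((w.count letter : Nat) : Int)
        then d.insert letter ((w.count letter : Nat) : Int) else d) PySem.Dict.empty)
      = F.foldl (fun d c => d.insert c ((w.count c : Nat) : Int)) PySem.Dict.empty := by
    rw [hF, hp]
    exact PySem.List.foldl_ite_eq_foldl_filter
      (fun x => 1 < ((w.count x : Nat) : Int))
      (fun d c => d.insert c ((w.count c : Nat) : Int)) w PySem.Dict.empty
  rw [hfold]
  set d : PySem.Dict Char Int :=
    F.foldl (fun d c => d.insert c ((w.count c : Nat) : Int)) PySem.Dict.empty with hd
  -- its keys are the distinct letters of F, and they are distinct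
  have hkeys : d.keys = PySem.Set.ofList F := by
    rw [hd]
    have h := PySem.Dict.keys_foldl_insert F
      (fun (_ : PySem.Dict Char Int) c => ((w.count c : Nat) : Int)) PySem.Dict.empty
    rw [PySem.Dict.keys_empty] at h
    exact h.trans (by simp [PySem.Set.update, PySem.Set.ofList_eq_foldl])
  have hnd : d.keys.Nodup := by
    rw [hd]
    exact PySem.Dict.nodup_keys_foldl_insert F
      (fun (_ : PySem.Dict Char Int) c => ((w.count c : Nat) : Int)) PySem.Dict.empty
      (by rw [PySem.Dict.keys_empty]; exact List.nodup_nil)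
  -- its values are the counts of those letters
  have hvals : d.values = (PySem.Set.ofList F).map (fun k => ((w.count k : Nat) : Int)) := by
    rw [PySem.Dict.values_eq_map_keys d hnd (0 : Int), hkeys]
    refine List.map_congr_left (fun k hk => ?_)
    have hkF : k ∈ F := (PySem.Set.mem_ofList F k).mp hk
    rw [hd]
    have hgd := pv_getD_foldl_insert_fun F (fun c => ((w.count c : Nat) : Int)) PySem.Dict.empty k
    rw [if_pos hkF] at hgd
    exact hgd
  -- inside F, counting in w equals counting in F
  have hcntF : ∀ k ∈ PySem.Set.ofList F, ((w.count k : Nat) : Int) = ((F.count k : Nat) : Int) := by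
    intro k hk
    have hkF : k ∈ F := (PySem.Set.mem_ofList F k).mp hk
    have hpk : p k = true := List.of_mem_filter hkF
    rw [hF]
    exact_mod_cast congrArg (fun n : Nat => (n : Int)) (List.count_filter hpk).symm
  have hsum : d.values.sum = (F.length : Int) := by
    rw [hvals, List.map_congr_left hcntF]
    calc ((PySem.Set.ofList F).map (fun k => ((F.count k : Nat) : Int))).sum
        = ((((PySem.Set.ofList F).map (fun k => F.count k)).map (fun n : Nat => (n : Int)))).sum := by
          rw [List.map_map]; rfl
      _ = ((((PySem.Set.ofList F).map (fun k => F.count k)).sum : Nat) : Int) :=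
          (Nat.cast_list_sum _).symm
      _ = (F.length : Int) := by
          rw [pv_sum_counts F (PySem.Set.ofList F) (PySem.Set.nodup_ofList F)
            (fun x => PySem.Set.mem_ofList F x)]
  rw [hsum]
  -- the letters failing the repeat test are exactly the letters of count 1
  have hG : w.filter (fun x => !p x) = w.filter (fun c => w.count c == 1) := by
    refine List.filter_congr (fun c hc => ?_)
    have h1 : 0 < w.count c := List.count_pos_iff.mpr hc
    simp only [hp]
    by_cases h : w.count c = 1
    · simp [h]
    · have h2 : 1 < w.count c := by omega
      have h2' : (1 : Int) < ((w.count c : Nat) : Int) := by exact_mod_cast h2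
      simp [h, h2']
  have hsplit := pv_length_filter_split w p
  rw [hG] at hsplit
  have hlen : (w.length : Int)
      = (F.length : Int) + ((w.filter (fun c => w.count c == 1)).length : Int) := by
    rw [hF]; exact_mod_cast hsplit.symm
  omega

-- B's run-scan on a sorted list counts the letters that occur exactly once in it
theorem pvRuns1_sorted : ∀ s : List Char, s.Pairwise (· ≤ ·) →
    pvRuns1 s = ((s.filter (fun c => s.count c == 1)).length : Int) := by
  intro s
  induction s using pvRuns1.induct with
  | case1 => intro _; simp [pvRuns1]
  | case2 c rest ih =>
    intro h
    rw [pvRuns1]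
    set run : List Char := rest.takeWhile (fun x => x == c) with hrunDef
    set rest' : List Char := rest.dropWhile (fun x => x == c) with hrest'Def
    have hsplit : run ++ rest' = rest := List.takeWhile_append_dropWhile
    have hrun : ∀ x ∈ run, x = c := by
      intro x hx
      rw [hrunDef] at hx
      exact eq_of_beq (List.mem_takeWhile_imp (p := fun y => y == c) hx)
    have hp' : rest'.Pairwise (· ≤ ·) :=
      List.Pairwise.sublist (List.dropWhile_sublist _) (List.Pairwise.of_cons h)
    have hcle : ∀ x ∈ rest, c ≤ x := (List.pairwise_cons.mp h).1
    -- c does not occur after its maximal run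
    have hnotc : c ∉ rest' := by
      intro hcmem
      cases hrest'cases : rest' with
      | nil => rw [hrest'cases] at hcmem; simp at hcmem
      | cons e t =>
        have hpe : ((fun x => x == c) e) = false :=
          pv_not_head_dropWhile _ rest e t (by rw [← hrest'Def]; exact hrest'cases)
        have hec : e ≠ c := by simpa using hpe
        have hmemrest : ∀ x ∈ rest', x ∈ rest := by
          intro x hx
          rw [hrest'Def] at hx
          exact (List.dropWhile_sublist _).mem hx
        have hce : c < e :=
          lt_of_le_of_ne (hcle e (hmemrest e (by rw [hrest'cases]; simp))) (Ne.symm hec)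
        rw [hrest'cases] at hcmem hp'
        rcases List.mem_cons.mp hcmem with hh | ht
        · exact hec hh.symm
        · have het : e ≤ c := (List.pairwise_cons.mp hp').1 c ht
          exact absurd (lt_of_lt_of_le hce het) (lt_irrefl c)
    have hcountrun : run.count c = run.length :=
      List.count_eq_length.mpr (fun b hb => (hrun b hb).symm)
    have hcountc : (c :: rest).count c = run.length + 1 := by
      rw [List.count_cons_self, ← hsplit, List.count_append, hcountrun,
        List.count_eq_zero.mpr hnotc]
    have hcount' : ∀ x ∈ rest', (c :: rest).count x = rest'.count x := by
      intro x hx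
      have hxc : x ≠ c := fun hxc => hnotc (hxc ▸ hx)
      have hxrun : x ∉ run := fun hxr => hxc (hrun x hxr)
      have hcx : ¬ c = x := fun hh => hxc hh.symm
      rw [← hsplit]
      simp [List.count_append, List.count_eq_zero.mpr hxrun, hcx]
    have hfilter' : rest'.filter (fun x => (c :: rest).count x == 1)
        = rest'.filter (fun x => rest'.count x == 1) :=
      List.filter_congr (fun x hx => by rw [hcount' x hx])
    cases hruncases : run with
    | nil =>
      have hrestEq : rest' = rest := by
        rw [hruncases] at hsplit
        simpa using hsplit
      have hpredc : ((c :: rest).count c == 1) = true := by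
        rw [hcountc, hruncases]
        simp
      rw [hrestEq] at ih hp' hfilter'
      rw [hrestEq, ih hp']
      have hfc : (c :: rest).filter (fun x => (c :: rest).count x == 1)
          = c :: rest.filter (fun x => rest.count x == 1) := by
        rw [List.filter_cons, if_pos hpredc, hfilter']
      rw [hfc, show (if ([] : List Char).isEmpty = true then (1:Int) else 0) = 1 from rfl]
      simp only [List.length_cons]
      push_cast
      ring
    | cons r rs =>
      have hlenrun : run.length + 1 ≠ 1 := by rw [hruncases]; simp
      have hpredc : ((c :: rest).count c == 1) = false := by
        rw [hcountc]
        exact beq_eq_false_iff_ne.mpr hlenrun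
      have hfilterrun : run.filter (fun x => (c :: rest).count x == 1) = [] := by
        apply List.filter_eq_nil_iff.mpr
        intro x hx
        have hxc : x = c := hrun x hx
        show ¬ ((List.count x (c :: rest) == 1) = true)
        rw [hxc, hpredc]
        simp
      have hfc : (c :: rest).filter (fun x => (c :: rest).count x == 1)
          = rest'.filter (fun x => rest'.count x == 1) := by
        rw [List.filter_cons, if_neg (by rw [hpredc]; simp)]
        rw [show rest.filter (fun x => (c :: rest).count x == 1)
              = run.filter (fun x => (c :: rest).count x == 1)
                ++ rest'.filter (fun x => (c :: rest).count x == 1) from by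
            rw [← List.filter_append, hsplit]]
        rw [hfilterrun, List.nil_append, hfilter']
      rw [hfc, ih hp']
      simp

-- B's value, same closed form
theorem pvB_closed (word : String) :
    chancesCalculator_alt word
      = 5 + ((word.toList.filter (fun c => word.toList.count c == 1)).length : Int) := by
  unfold chancesCalculator_alt
  set w : List Char := word.toList with hw
  set t : List Char := PySem.List.sorted w (fun x => x) false with ht
  have hperm : t.Perm w := PySem.List.sorted_perm w (fun x => x) false
  have hpw : t.Pairwise (· ≤ ·) := PySem.List.sorted_pairwise w (fun x => x)
  rw [pvRuns1_sorted t hpw]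
  have h1 : t.filter (fun c => t.count c == 1) = t.filter (fun c => w.count c == 1) :=
    List.filter_congr (fun x _ => by rw [hperm.count_eq])
  have h2 : (t.filter (fun c => w.count c == 1)).length
      = (w.filter (fun c => w.count c == 1)).length :=
    (hperm.filter _).length_eq
  rw [h1, h2]
  ring

-- ===== VERDICT (by name: the statement is the Claim_ definition above) =====
theorem chancesCalculator_spec : Claim_equal_chancesCalculator := by
  intro word _
  unfold Spec_chancesCalculator
  rw [pvA_closed, pvB_closed]
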